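-- pv_equiv track=rewrite | github.com/brunakrodrigues/valorant-smurf-check-tracker | smurf_rules.py | tier_to_label
-- ===== SOURCE A (Python) =====
-- from typing import Optional, Tuple
--
-- TIER_LABELS = [
--     (0, "Unranked"),
--     (3, "Iron"),
--     (6, "Bronze"),
--     (9, "Silver"),
--     (12, "Gold"),
--     (15, "Platinum"),
--     (18, "Diamond"),
--     (21, "Ascendant"),
--     (24, "Immortal"),
--     (27, "Radiant"),
-- ]
--
-- def tier_to_label(tier: Optional[int]) -> str:
--     if tier is None:
--         return "Unknown"
--     label = "Unranked"
--     for threshold, name in TIER_LABELS: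
--         if tier >= threshold:
--             label = name
--     return label
-- ===== SOURCE B (Python) =====
-- TIER_NAMES = ["Unranked", "Iron", "Bronze", "Silver", "Gold",
--               "Platinum", "Diamond", "Ascendant", "Immortal", "Radiant"]
--
-- def tier_to_label(tier):
--     if tier is None:
--         return "Unknown"
--     idx = min(max(tier // 3, 0), len(TIER_NAMES) - 1)
--     return TIER_NAMES[idx]
-- ===== Notes on version B (the rewrite author's own statement) =====
-- stated objective: simpler
-- what changed: Replaces the linear scan over (threshold,name) pairs keeping the last matching label by a closed-form index tier // 3 clamped to [0,9] into a plain name list.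
import Mathlib
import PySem

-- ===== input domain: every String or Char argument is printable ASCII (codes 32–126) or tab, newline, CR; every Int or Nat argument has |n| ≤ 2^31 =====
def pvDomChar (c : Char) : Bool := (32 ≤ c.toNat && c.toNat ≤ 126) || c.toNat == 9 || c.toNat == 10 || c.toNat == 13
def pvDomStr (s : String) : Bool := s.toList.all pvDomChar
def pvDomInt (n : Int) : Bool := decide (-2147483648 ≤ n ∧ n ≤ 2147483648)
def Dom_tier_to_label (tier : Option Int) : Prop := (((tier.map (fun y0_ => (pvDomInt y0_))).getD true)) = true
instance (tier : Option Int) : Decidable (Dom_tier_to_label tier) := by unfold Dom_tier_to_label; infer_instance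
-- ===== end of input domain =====

-- B replaces A's linear scan-and-keep-last over threshold pairs by a closed-form
-- clamped index tier // 3 into a plain name list (simpler; same results).

-- ===== PORT A =====
def TIER_LABELS : List (Int × String) :=
  [(0, "Unranked"), (3, "Iron"), (6, "Bronze"), (9, "Silver"), (12, "Gold"),
   (15, "Platinum"), (18, "Diamond"), (21, "Ascendant"), (24, "Immortal"), (27, "Radiant")]

def tier_to_label (tier : Option Int) : String :=
  match tier with
  | none => "Unknown"
  | some t =>
    TIER_LABELS.foldl (fun label p => if t ≥ p.1 then p.2 else label) "Unranked"

-- ===== PORT B =====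
def TIER_NAMES : List String :=
  ["Unranked", "Iron", "Bronze", "Silver", "Gold",
   "Platinum", "Diamond", "Ascendant", "Immortal", "Radiant"]

def tier_to_label_alt (tier : Option Int) : String :=
  match tier with
  | none => "Unknown"
  | some t =>
    let idx := min (max (PySem.Int.floordiv t 3) 0) ((TIER_NAMES.length : Int) - 1)
    -- idx is provably in range; .getD "" only totalises the list indexing
    (PySem.List.pyGet? TIER_NAMES idx).getD ""

-- ===== PRECONDITION & SPEC =====
def Spec_tier_to_label (tier : Option Int) (out : String) : Prop := out = tier_to_label_alt tier
instance (tier : Option Int) (out : String) : Decidable (Spec_tier_to_label tier out) := by unfold Spec_tier_to_label; infer_instance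

-- ===== CLAIM (what is proved, stated in full; the proofs are below) =====
def Claim_equal_tier_to_label : Prop := ∀ (tier : Option Int), Dom_tier_to_label tier → Spec_tier_to_label tier (tier_to_label tier)

-- ===== LEMMAS AND PROOFS =====
theorem tier_to_label_alt_some (t : Int) :
    tier_to_label_alt (some t) =
      (PySem.List.pyGet? TIER_NAMES (min (max (t / 3) 0) 9)).getD "" := by
  simp [tier_to_label_alt, TIER_NAMES]

-- ===== VERDICT (by name: the statement is the Claim_ definition above) =====
theorem tier_to_label_spec : Claim_equal_tier_to_label := by
  intro tier _
  unfold Spec_tier_to_label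
  match tier with
  | none => rfl
  | some t =>
    rw [tier_to_label_alt_some]
    simp only [tier_to_label, TIER_LABELS, List.foldl]
    split_ifs with h27 h24 h21 h18 h15 h12 h9 h6 h3 h0 <;>
      [ (have : min (max (t / 3) 0) 9 = 9 := by omega);
        (have : min (max (t / 3) 0) 9 = 8 := by omega);
        (have : min (max (t / 3) 0) 9 = 7 := by omega);
        (have : min (max (t / 3) 0) 9 = 6 := by omega);
        (have : min (max (t / 3) 0) 9 = 5 := by omega);
        (have : min (max (t / 3) 0) 9 = 4 := by omega);
        (have : min (max (t / 3) 0) 9 = 3 := by omega);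
        (have : min (max (t / 3) 0) 9 = 2 := by omega);
        (have : min (max (t / 3) 0) 9 = 1 := by omega);
        (have : min (max (t / 3) 0) 9 = 0 := by omega);
        (have : min (max (t / 3) 0) 9 = 0 := by omega) ] <;>
      rw [this] <;> rfl
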